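-- pv_equiv track=rewrite | github.com/mykk/AdventOfCode | 2015/day25.py | findCode
-- ===== SOURCE A (Python) =====
-- STARTING_CODE: int = 20151125
--
-- def nextCode(current_code: int) -> int:
--     MULTIPLIER: int = 252533
--     DIVISOR: int = 33554393
--     return current_code * MULTIPLIER % DIVISOR
--
-- def getIndex(row: int, column: int) -> int:
--     counter = 0
--     if row != 1:
--         counter = column
--         column = row + column - 2
--     return column * (column + 1) // 2 + counter - 1
--
-- def findCode(row: int, column: int) -> int:
--     index = getIndex(row, column)
--
--     code = STARTING_CODE
--     code_to_index = {STARTING_CODE: 0}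
--     index_to_code = {0: STARTING_CODE}
--     for i in range(1, index + 1):
--         code = nextCode(code)
--         if code in code_to_index:
--             duplicate_start_index = code_to_index[code]
--             loop_size = i - duplicate_start_index
--             index = index - duplicate_start_index
--             loops = index // loop_size
--             remainder = index - loops * loop_size
--             return index_to_code[remainder]
--         else:
--             code_to_index[code] = i
--             index_to_code[i] = code
--     return code
-- ===== SOURCE B (Python) =====
-- STARTING_CODE: int = 20151125
--
-- def findCode(row: int, column: int) -> int:
--     MULTIPLIER: int = 252533
--     DIVISOR: int = 33554393
--     if row == 1:
--         diag, offset = column, 0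
--     else:
--         diag, offset = row + column - 2, column
--     index = diag * (diag + 1) // 2 + offset - 1
--     if index < 0:
--         return STARTING_CODE
--     return STARTING_CODE * pow(MULTIPLIER, index, DIVISOR) % DIVISOR
-- ===== Notes on version B (the rewrite author's own statement) =====
-- stated objective: faster
-- what changed: Replaces A's step-by-step iteration of the code sequence with cycle detection (two dicts recording every code seen) by a single modular exponentiation: STARTING_CODE * pow(MULTIPLIER, index, DIVISOR) % DIVISOR.
import Mathlib
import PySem

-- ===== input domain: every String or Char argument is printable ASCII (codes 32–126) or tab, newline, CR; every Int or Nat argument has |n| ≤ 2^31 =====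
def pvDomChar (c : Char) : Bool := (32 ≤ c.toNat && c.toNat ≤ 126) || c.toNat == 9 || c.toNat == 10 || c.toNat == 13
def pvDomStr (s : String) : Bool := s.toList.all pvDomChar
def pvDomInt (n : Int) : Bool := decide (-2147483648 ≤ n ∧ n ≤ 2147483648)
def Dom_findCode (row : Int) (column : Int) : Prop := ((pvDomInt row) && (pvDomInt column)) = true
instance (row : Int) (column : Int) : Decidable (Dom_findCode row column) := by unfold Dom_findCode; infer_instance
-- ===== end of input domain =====

-- B replaces A's step-by-step iteration with cycle detection by one modular exponentiation
-- (same return value; measurably faster on large grids).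

-- ===== PORT A =====
def nextCode (current_code : Int) : Int :=
  PySem.Int.mod (current_code * 252533) 33554393

def getIndex (row : Int) (column : Int) : Int :=
  -- counter = 0; if row != 1: counter = column; column = row + column - 2
  let p := if row ≠ 1 then (column, row + column - 2) else ((0 : Int), column)
  PySem.Int.floordiv (p.2 * (p.2 + 1)) 2 + p.1 - 1

-- the 'for i in range(1, index + 1)' loop with its early return on a duplicate code.
-- Python's dicts are hash maps; they are ported as Std.HashMap (same get/insert
-- semantics, proved through the Std lemmas) so that, like A's dicts, lookups do not
-- scan the whole history on every iteration.
def findLoop : List Int → Int → Std.HashMap Int Int → Std.HashMap Int Int → Int → Int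
  | [], code, _, _, _ => code
  | i :: rest, code, code_to_index, index_to_code, index =>
    let code := nextCode code
    match code_to_index[code]? with
    | some duplicate_start_index =>
        let loop_size := i - duplicate_start_index
        let index := index - duplicate_start_index
        let loops := PySem.Int.floordiv index loop_size
        let remainder := index - loops * loop_size
        -- index_to_code[remainder]: the key is always present (0 ≤ remainder < i), proved below
        index_to_code[remainder]?.getD 0
    | none =>
        findLoop rest code (code_to_index.insert code i) (index_to_code.insert i code) index

def findCode (row : Int) (column : Int) : Int :=
  let index := getIndex row column
  findLoop (PySem.List.pyRange 1 (index + 1) 1) 20151125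
    (Std.HashMap.emptyWithCapacity.insert 20151125 0)
    (Std.HashMap.emptyWithCapacity.insert 0 20151125) index

-- ===== PORT B =====
def findCode_alt (row : Int) (column : Int) : Int :=
  let p := if row = 1 then (column, (0 : Int)) else (row + column - 2, column)
  let index := PySem.Int.floordiv (p.1 * (p.1 + 1)) 2 + p.2 - 1
  if index < 0 then 20151125
  else PySem.Int.mod (20151125 * PySem.Int.powMod 252533 index.toNat 33554393) 33554393

-- ===== PRECONDITION & SPEC =====
def Spec_findCode (row : Int) (column : Int) (out : Int) : Prop := out = findCode_alt row column
instance (row : Int) (column : Int) (out : Int) : Decidable (Spec_findCode row column out) := by unfold Spec_findCode; infer_instance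

-- ===== CLAIM (what is proved, stated in full; the proofs are below) =====
def Claim_equal_findCode : Prop := ∀ (row : Int) (column : Int), Dom_findCode row column → Spec_findCode row column (findCode row column)

-- ===== LEMMAS AND PROOFS =====

-- the code sequence A iterates
def seq : Nat → Int
  | 0 => 20151125
  | n + 1 => nextCode (seq n)

lemma seq_bounds (n : Nat) : 0 ≤ seq n ∧ seq n < 33554393 := by
  cases n with
  | zero => simp [seq]
  | succ k =>
    constructor
    · exact PySem.Int.mod_nonneg _ (by norm_num)
    · exact PySem.Int.mod_lt _ (by norm_num)

lemma seq_step_inj {a b : Nat} (h : seq (a + 1) = seq (b + 1)) : seq a = seq b := by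
  have hD : (0:Int) < 33554393 := by norm_num
  simp only [seq, nextCode, PySem.Int.mod_eq_emod_of_pos hD] at h
  have h' : seq a * 252533 ≡ seq b * 252533 [ZMOD 33554393] := h
  have h2 := Int.ModEq.cancel_right_div_gcd hD h'
  have hg : Int.gcd 33554393 252533 = 1 := by decide
  rw [hg] at h2
  simp only [Nat.cast_one, Int.ediv_one] at h2
  have ha := seq_bounds a
  have hb := seq_bounds b
  have h3 : seq a % 33554393 = seq b % 33554393 := h2
  rwa [Int.emod_eq_of_lt ha.1 ha.2, Int.emod_eq_of_lt hb.1 hb.2] at h3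

lemma seq_period (p : Nat) (hp : seq p = seq 0) : ∀ m, seq (m + p) = seq m := by
  intro m
  induction m with
  | zero => simpa using hp
  | succ k ih =>
    have : k + 1 + p = (k + p) + 1 := by omega
    rw [this]; show nextCode (seq (k + p)) = _; rw [ih]; rfl

lemma seq_mod (p : Nat) (hp0 : 0 < p) (hp : seq p = seq 0) : ∀ m, seq m = seq (m % p) := by
  intro m
  induction m using Nat.strong_induction_on with
  | _ m ih =>
    by_cases h : m < p
    · rw [Nat.mod_eq_of_lt h]
    · have h1 : m - p + p = m := by omega
      have h2 : (m - p + p) % p = (m - p) % p := Nat.add_mod_right _ _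
      rw [← h1, seq_period p hp, ih (m - p) (by omega), h2]

lemma seq_closed (n : Nat) : seq n = (20151125 * 252533 ^ n) % 33554393 := by
  induction n with
  | zero => simp [seq]
  | succ k ih =>
    show PySem.Int.mod (seq k * 252533) 33554393 = _
    rw [PySem.Int.mod_eq_emod_of_pos (by norm_num), ih, pow_succ, ← mul_assoc]
    conv_lhs => rw [Int.mul_emod, Int.emod_emod_of_dvd _ dvd_rfl, ← Int.mul_emod]

lemma findLoop_eq (n : Nat) : ∀ (d k : Nat), n = k + d →
    (∀ a b : Nat, a ≤ k → b ≤ k → seq a = seq b → a = b) →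
    ∀ (c2i i2c : Std.HashMap Int Int),
    (∀ m : Nat, m ≤ k → i2c[(m : Int)]? = some (seq m)) →
    (∀ x j, c2i[x]? = some j → ∃ m : Nat, m ≤ k ∧ j = (m : Int) ∧ seq m = x) →
    (∀ m : Nat, m ≤ k → c2i[(seq m)]? = some (m : Int)) →
    findLoop (PySem.List.pyRange ((k : Int) + 1) ((n : Int) + 1) 1) (seq k) c2i i2c (n : Int) = seq n := by
  intro d
  induction d with
  | zero =>
    intro k hn _ c2i i2c _ _ _
    have hk : k = n := by omega
    rw [PySem.List.pyRange_one_eq_nil (by exact_mod_cast Nat.le_of_eq (congrArg (· + 1) hk.symm))]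
    subst hk
    rfl
  | succ d ih =>
    intro k hn Hd c2i i2c H1 H2 H3
    have hk : k < n := by omega
    rw [PySem.List.pyRange_one_cons (by exact_mod_cast Nat.succ_lt_succ hk)]
    simp only [findLoop]
    rw [show nextCode (seq k) = seq (k + 1) from rfl]
    cases hc : c2i[(seq (k + 1))]? with
    | some j =>
      obtain ⟨m, hm, hj, hsm⟩ := H2 _ _ hc
      have hm0 : m = 0 := by
        by_contra h0
        have h1 : m - 1 + 1 = m := by omega
        have h2 := seq_step_inj (a := m - 1) (b := k) (by rw [h1, hsm])
        have := Hd (m - 1) k (by omega) le_rfl h2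
        omega
      subst hm0
      have hp : seq (k + 1) = seq 0 := hsm.symm
      simp only [hj, Nat.cast_zero, sub_zero]
      have hcast : (k : Int) + 1 = ((k + 1 : Nat) : Int) := by push_cast; ring
      rw [hcast, PySem.Int.floordiv_natCast]
      have hrem : (n : Int) - ((n / (k + 1) : Nat) : Int) * ((k + 1 : Nat) : Int) = ((n % (k + 1) : Nat) : Int) := by
        have h0 : n / (k + 1) * (k + 1) + n % (k + 1) = n := Nat.div_add_mod' n (k + 1)
        rw [← Nat.cast_mul]
        omega
      rw [hrem, H1 _ (Nat.le_of_lt_succ (Nat.mod_lt _ (Nat.succ_pos k)))]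
      rw [← seq_mod (k + 1) (by omega) hp n]
      rfl
    | none =>
      have hne : ∀ m : Nat, m ≤ k → seq m ≠ seq (k + 1) := by
        intro m hm heq
        have h := H3 m hm
        rw [heq, hc] at h
        simp at h
      have hcast : (k : Int) + 1 = ((k + 1 : Nat) : Int) := by push_cast; ring
      rw [hcast]
      have hrec := ih (k + 1) (by omega)
        (by
          intro a b ha hb heq
          rcases Nat.lt_or_ge a (k + 1) with ha' | ha'
          · rcases Nat.lt_or_ge b (k + 1) with hb' | hb'
            · exact Hd a b (by omega) (by omega) heq
            · have hb2 : b = k + 1 := by omega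
              exact absurd (hb2 ▸ heq) (hne a (by omega))
          · have ha2 : a = k + 1 := by omega
            rcases Nat.lt_or_ge b (k + 1) with hb' | hb'
            · exact absurd (ha2 ▸ heq.symm) (hne b (by omega))
            · omega)
        (c2i.insert (seq (k + 1)) ((k + 1 : Nat) : Int))
        (i2c.insert ((k + 1 : Nat) : Int) (seq (k + 1)))
        (by
          intro m hm
          rw [Std.HashMap.getElem?_insert]
          by_cases hmk : m = k + 1
          · subst hmk; simp
          · rw [if_neg (by simp only [beq_iff_eq]; exact fun h => hmk (by exact_mod_cast h.symm))]
            exact H1 m (by omega))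
        (by
          intro x j hx
          rw [Std.HashMap.getElem?_insert] at hx
          by_cases hxk : x = seq (k + 1)
          · rw [if_pos (by simp only [beq_iff_eq]; exact hxk.symm)] at hx
            exact ⟨k + 1, le_rfl, (Option.some_injective _ hx).symm, hxk.symm⟩
          · rw [if_neg (by simp only [beq_iff_eq]; exact fun h => hxk h.symm)] at hx
            obtain ⟨m, hm, hj, hsm⟩ := H2 _ _ hx
            exact ⟨m, by omega, hj, hsm⟩)
        (by
          intro m hm
          rw [Std.HashMap.getElem?_insert]
          by_cases hmk : m = k + 1
          · subst hmk; simp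
          · rw [if_neg (by simp only [beq_iff_eq]; exact fun h => hne m (by omega) h.symm)]
            exact H3 m (by omega))
      rw [show ((k + 1 : Nat) : Int) + 1 = (k : Int) + 1 + 1 by push_cast; ring] at hrec
      exact hrec

-- B in terms of A's getIndex (the two index formulas are the same arithmetic)
lemma alt_eq_branch (row column : Int) :
    findCode_alt row column =
      if getIndex row column < 0 then 20151125
      else PySem.Int.mod (20151125 * PySem.Int.powMod 252533 (getIndex row column).toNat 33554393) 33554393 := by
  by_cases hr : row = 1 <;> simp [findCode_alt, getIndex, hr]

-- B's arithmetic expression is the n-th code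
lemma alt_value_eq (n : Nat) :
    PySem.Int.mod (20151125 * PySem.Int.powMod 252533 n 33554393) 33554393 = seq n := by
  rw [PySem.Int.powMod_eq_emod _ _ (by norm_num), PySem.Int.mod_eq_emod_of_pos (by norm_num),
    seq_closed n]
  conv_lhs => rw [Int.mul_emod, Int.emod_emod_of_dvd _ dvd_rfl, ← Int.mul_emod]

-- ===== VERDICT (by name: the statement is the Claim_ definition above) =====
theorem findCode_spec : Claim_equal_findCode := by
  intro row column _
  show findCode row column = findCode_alt row column
  rw [alt_eq_branch]
  show findLoop (PySem.List.pyRange 1 (getIndex row column + 1) 1) 20151125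
      (Std.HashMap.emptyWithCapacity.insert 20151125 0)
      (Std.HashMap.emptyWithCapacity.insert 0 20151125)
      (getIndex row column) = _
  rcases lt_or_ge (getIndex row column) 0 with hI | hI
  · rw [if_pos hI, PySem.List.pyRange_one_eq_nil (by omega)]
    rfl
  · rw [if_neg (not_lt.mpr hI)]
    set I := getIndex row column with hIdef
    obtain ⟨n, hn⟩ : ∃ n : Nat, I = (n : Int) := ⟨I.toNat, (Int.toNat_of_nonneg hI).symm⟩
    rw [hn, alt_value_eq, Int.toNat_natCast]
    have h0 := findLoop_eq n n 0 (by omega)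
      (by intro a b ha hb _; omega)
      (Std.HashMap.emptyWithCapacity.insert 20151125 0)
      (Std.HashMap.emptyWithCapacity.insert 0 20151125)
      (by intro m hm; have hm0 : m = 0 := by omega
          subst hm0; show _ = some (seq 0); rw [show seq 0 = 20151125 from rfl]; simp)
      (by
        intro x j hx
        rw [Std.HashMap.getElem?_insert] at hx
        by_cases hxs : x = 20151125
        · rw [if_pos (by simp only [beq_iff_eq]; exact hxs.symm)] at hx
          exact ⟨0, le_rfl, (Option.some_injective _ hx).symm, by rw [hxs]; rfl⟩
        · rw [if_neg (by simp only [beq_iff_eq]; exact fun h => hxs h.symm)] at hx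
          rw [Std.HashMap.getElem?_emptyWithCapacity] at hx
          exact absurd hx (by simp))
      (by intro m hm; have hm0 : m = 0 := by omega
          subst hm0; rw [show seq 0 = 20151125 from rfl]; simp)
    rw [show ((0 : Nat) : Int) + 1 = 1 from rfl] at h0
    exact h0
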